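-- pv_equiv track=rewrite | github.com/yidoyoon/problem-solving | src/programmers/12930/12930.py | solution
-- ===== SOURCE A (Python) =====
-- def solution(s):
--     ans = ""
--     ss = s.split()
--     for s in ss:
--         for i in range(len(s)):
--             if i & 1 == 0:
--                 ans += s[i].upper()
--             else:
--                 ans += s[i]
--         ans += ' '
--
--     return ans[:-1]
-- ===== SOURCE B (Python) =====
-- def solution(s):
--     words = []
--     for w in s.split():
--         buf = []
--         i = 0
--         while i + 1 < len(w):
--             buf.append(w[i].upper())
--             buf.append(w[i + 1])
--             i += 2
--         if i < len(w):
--             buf.append(w[i].upper())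
--         words.append(''.join(buf))
--     return ' '.join(words)
-- ===== Notes on version B (the rewrite author's own statement) =====
-- stated objective: alternative
-- what changed: Replaces A's per-index loop with a parity test and the trailing-space-then-slice hack by per-word pairwise (two-chars-at-a-time) rebuilding with no parity test, with the words joined by str.join.
import Mathlib
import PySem

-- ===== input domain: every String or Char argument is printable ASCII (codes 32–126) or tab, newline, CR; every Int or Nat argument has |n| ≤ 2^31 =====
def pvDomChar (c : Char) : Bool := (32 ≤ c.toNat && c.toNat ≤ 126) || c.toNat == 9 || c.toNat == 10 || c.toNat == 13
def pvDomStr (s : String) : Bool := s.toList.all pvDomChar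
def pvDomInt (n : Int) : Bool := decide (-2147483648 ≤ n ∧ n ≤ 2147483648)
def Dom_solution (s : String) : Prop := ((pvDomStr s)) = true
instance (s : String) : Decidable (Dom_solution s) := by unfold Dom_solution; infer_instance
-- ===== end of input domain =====

-- B rebuilds each word two characters at a time and joins with ' '.join, instead of A's
-- index loop with a parity test and the trailing-space-then-[:-1] hack; same cost, different decomposition.

-- ===== PORT A =====
-- literal port of A over List Char (PySem.Str functions are thin wrappers over PySem.Chars);
-- Python's 'i & 1 == 0' is ported as 'i % 2 == 0': both test the low bit, exact for every Int.
def solutionCharsA (cs : List Char) : List Char :=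
  let ans : List Char := []
  let ss := PySem.Chars.split₀ cs
  let ans := ss.foldl (fun ans w =>
    ((PySem.List.pyRange 0 (w.length : Int) 1).foldl (fun ans i =>
      if i % 2 == 0 then
        ans ++ (match PySem.List.pyGet? w i with | some c => [PySem.Chars.upperChar c] | none => [])
      else
        ans ++ (match PySem.List.pyGet? w i with | some c => [c] | none => [])) ans)
      ++ [' ']) ans
  PySem.List.slice ans none (some (-1))

def solution (s : String) : String := String.ofList (solutionCharsA s.toList)

-- ===== PORT B =====
-- port of Source B's inner while loop: consume the word two characters per step
def rebuildB : List Char → List Char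
  | [] => []
  | [c] => [PySem.Chars.upperChar c]
  | a :: b :: rest => PySem.Chars.upperChar a :: b :: rebuildB rest

def solution_alt (s : String) : String :=
  String.ofList (PySem.Chars.join [' '] ((PySem.Chars.split₀ s.toList).map rebuildB))

-- ===== PRECONDITION & SPEC =====
def Spec_solution (s : String) (out : String) : Prop := out = solution_alt s
instance (s : String) (out : String) : Decidable (Spec_solution s out) := by unfold Spec_solution; infer_instance

-- ===== CLAIM (what is proved, stated in full; the proofs are below) =====
def Claim_equal_solution : Prop := ∀ (s : String), Dom_solution s → Spec_solution s (solution s)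

-- ===== LEMMAS AND PROOFS =====

-- A's inner index loop, re-expressed over List.range after pyRange/pyGet? normalisation
def innerG (w : List Char) : List Char :=
  (List.range w.length).flatMap (fun k =>
    if k % 2 = 0 then [PySem.Chars.upperChar (w.getD k ' ')] else [w.getD k ' '])

lemma innerG_eq_rebuildB : ∀ w : List Char, innerG w = rebuildB w
  | [] => rfl
  | [c] => rfl
  | a :: b :: rest => by
    have ih := innerG_eq_rebuildB rest
    simp only [innerG, rebuildB, List.length_cons]
    rw [show rest.length + 1 + 1 = rest.length + 2 by omega,
        List.range_succ_eq_map, List.range_succ_eq_map]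
    simp only [List.flatMap_cons, List.flatMap_map]
    simp only [innerG] at ih
    rw [← ih]
    simp [Nat.succ_mod_two_eq_zero_iff]
    congr 1
    funext k
    simp [Nat.succ_mod_two_eq_one_iff]

lemma inner_eq (w : List Char) (ans : List Char) :
    (PySem.List.pyRange 0 (w.length : Int) 1).foldl (fun ans i =>
      if i % 2 == 0 then
        ans ++ (match PySem.List.pyGet? w i with | some c => [PySem.Chars.upperChar c] | none => [])
      else
        ans ++ (match PySem.List.pyGet? w i with | some c => [c] | none => [])) ans
    = ans ++ innerG w := by
  rw [PySem.List.foldl_congr_mem _ _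
      (fun ans i =>
        ans ++ (if i % 2 == 0 then
          (match PySem.List.pyGet? w i with | some c => [PySem.Chars.upperChar c] | none => [])
        else
          (match PySem.List.pyGet? w i with | some c => [c] | none => [])))
      ans (by intro acc x _; dsimp only; split <;> rfl)]
  rw [PySem.List.foldl_append_eq_flatMap]
  congr 1
  rw [PySem.List.pyRange_one]
  rw [List.flatMap_map]
  apply List.flatMap_congr
  intro k hk
  have hk' : k < w.length := List.mem_range.mp hk
  rcases Nat.mod_two_eq_zero_or_one k with h | h <;>
      simp [List.getElem?_eq_getElem hk', h]
  · intro hc; exact absurd hc (by omega)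
  · intro hc; exact absurd hc (by omega)

lemma dropLast_join : ∀ rs : List (List Char),
    (rs.flatMap (fun r => rebuildB r ++ [' '])).dropLast
      = PySem.Chars.join [' '] (rs.map rebuildB)
  | [] => by simp [PySem.Chars.join_nil]
  | [r] => by simp [PySem.Chars.join_singleton]
  | r :: q :: rest => by
    have ih := dropLast_join (q :: rest)
    rw [List.flatMap_cons, List.dropLast_append_of_ne_nil (by simp), ih]
    simp [PySem.Chars.join_cons_cons]

lemma solution_eq (s : String) : solution s = solution_alt s := by
  unfold solution solution_alt
  congr 1
  dsimp only [solutionCharsA]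
  rw [PySem.List.foldl_congr_mem _ _
      (fun ans w => ans ++ (rebuildB w ++ [' '])) []
      (by
        intro acc w _
        rw [inner_eq, innerG_eq_rebuildB, List.append_assoc])]
  rw [PySem.List.foldl_append_eq_flatMap, List.nil_append, PySem.List.slice_to_neg_one,
      dropLast_join]

-- ===== VERDICT (by name: the statement is the Claim_ definition above) =====
theorem solution_spec : Claim_equal_solution := by
  intro s _
  unfold Spec_solution
  exact solution_eq s
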